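-- pv_equiv track=rewrite | github.com/yashg16422-design/GSOC-FineGrainExp_Task | benchmarkingIO.py | build_single_file_index
-- ===== SOURCE A (Python) =====
-- def build_single_file_index(records):
--     index = []
--     offset = 0
--     for record in records:
--         size = len(record)
--         index.append((offset, size))
--         offset += size
--     return index
-- ===== SOURCE B (Python) =====
-- def build_single_file_index(records):
--     # Divide and conquer: index each half independently (offsets relative to
--     # the half's own start), then shift the right half's offsets by the total
--     # length of the left half. No running offset, no prefix-sum scan.
--     def index_of(rs):
--         if len(rs) <= 1:
--             return [(0, len(r)) for r in rs]
--         mid = len(rs) // 2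
--         left = index_of(rs[:mid])
--         right = index_of(rs[mid:])
--         shift = sum(len(r) for r in rs[:mid])
--         return left + [(off + shift, sz) for (off, sz) in right]
--     return index_of(records)
-- ===== Notes on version B (the rewrite author's own statement) =====
-- stated objective: alternative
-- what changed: Replaces A's forward scan with a running offset by divide and conquer: index each half of the list independently, then shift the right half's offsets by the left half's total length; no accumulator is threaded.
import Mathlib
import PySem

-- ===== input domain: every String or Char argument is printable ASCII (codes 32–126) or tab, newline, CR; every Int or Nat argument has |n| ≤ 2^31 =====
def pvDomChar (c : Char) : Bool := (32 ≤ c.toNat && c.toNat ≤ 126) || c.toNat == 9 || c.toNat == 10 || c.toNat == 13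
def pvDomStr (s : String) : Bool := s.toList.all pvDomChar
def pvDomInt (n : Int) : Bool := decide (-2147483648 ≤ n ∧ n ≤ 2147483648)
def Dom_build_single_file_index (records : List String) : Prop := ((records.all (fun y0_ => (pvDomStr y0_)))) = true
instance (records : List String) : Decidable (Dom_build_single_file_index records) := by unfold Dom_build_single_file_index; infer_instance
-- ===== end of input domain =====

-- B builds the index by divide and conquer (index each half, shift the right half by the
-- left half's total length) instead of A's forward running-offset scan; objective: alternative.

-- ===== PORT A =====
def build_single_file_index (records : List String) : List (Int × Int) :=
  (records.foldl
    (fun (st : List (Int × Int) × Int) record =>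
      let size : Int := PySem.Str.len record
      (st.1 ++ [(st.2, size)], st.2 + size))
    ([], 0)).1

-- ===== PORT B =====
-- inner helper index_of of Source B: divide, recurse on both halves, shift the right half
def bsfiIndexOf (rs : List String) : List (Int × Int) :=
  if _h : rs.length ≤ 1 then
    rs.map (fun r => (0, PySem.Str.len r))
  else
    let mid := rs.length / 2
    let left := bsfiIndexOf (rs.take mid)
    let right := bsfiIndexOf (rs.drop mid)
    let shift : Int := ((rs.take mid).map (fun r => PySem.Str.len r)).sum
    left ++ right.map (fun p => (p.1 + shift, p.2))
termination_by rs.length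
decreasing_by
  all_goals simp only [List.length_take, List.length_drop]; omega

def build_single_file_index_alt (records : List String) : List (Int × Int) :=
  bsfiIndexOf records

-- ===== PRECONDITION & SPEC =====
def Spec_build_single_file_index (records : List String) (out : List (Int × Int)) : Prop := out = build_single_file_index_alt records
instance (records : List String) (out : List (Int × Int)) : Decidable (Spec_build_single_file_index records out) := by unfold Spec_build_single_file_index; infer_instance

-- ===== CLAIM (what is proved, stated in full; the proofs are below) =====
def Claim_equal_build_single_file_index : Prop := ∀ (records : List String), Dom_build_single_file_index records → Spec_build_single_file_index records (build_single_file_index records)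

-- ===== LEMMAS AND PROOFS =====
-- canonical shift-based description used only by the proof
def bsfiF (rs : List String) : List (Int × Int) :=
  rs.foldr
    (fun r index =>
      let n : Int := PySem.Str.len r
      (0, n) :: index.map (fun p => (p.1 + n, p.2)))
    []

theorem bsfiF_append (xs ys : List String) :
    bsfiF (xs ++ ys)
      = bsfiF xs ++ (bsfiF ys).map
          (fun p => (p.1 + (xs.map (fun r => PySem.Str.len r)).sum, p.2)) := by
  induction xs with
  | nil => simp [bsfiF]
  | cons x xs ih =>
    simp only [List.cons_append, bsfiF, List.foldr_cons] at *
    rw [ih]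
    simp [List.map_map, Function.comp]
    intro a b _; omega

theorem bsfiIndexOf_eq_F (rs : List String) : bsfiIndexOf rs = bsfiF rs := by
  induction rs using bsfiIndexOf.induct with
  | case1 rs h =>
    rw [bsfiIndexOf]
    simp [h]
    match rs, h with
    | [], _ => simp [bsfiF]
    | [r], _ => simp [bsfiF]
  | case2 rs h mid ihl ihr =>
    rw [bsfiIndexOf]
    simp only [h, dif_neg, not_false_iff]
    rw [ihl, ihr]
    conv_rhs => rw [← List.take_append_drop (rs.length / 2) rs, bsfiF_append]

theorem bsfi_fold (records : List String) (acc : List (Int × Int)) (off : Int) :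
    (records.foldl
      (fun (st : List (Int × Int) × Int) record =>
        let size : Int := PySem.Str.len record
        (st.1 ++ [(st.2, size)], st.2 + size))
      (acc, off)).1
    = acc ++ (bsfiF records).map (fun p => (p.1 + off, p.2)) := by
  induction records generalizing acc off with
  | nil => simp [bsfiF]
  | cons r rs ih =>
    simp only [List.foldl_cons]
    rw [ih]
    simp [bsfiF, List.map_map, Function.comp]
    intro a b _
    omega

-- ===== VERDICT (by name: the statement is the Claim_ definition above) =====
theorem build_single_file_index_spec : Claim_equal_build_single_file_index := by
  intro records _
  unfold Spec_build_single_file_index build_single_file_index build_single_file_index_alt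
  rw [bsfiIndexOf_eq_F]
  simpa using bsfi_fold records [] 0
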